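-- pv_equiv track=rewrite | github.com/anccduarte/PhageAnnotate | src/sub/_build_test_db_cs.py | build_labels_dict
-- ===== SOURCE A (Python) =====
-- def build_labels_dict(lines: list) -> dict:
--     """
--     Receives a list of lines each containing a label and a corresponding
--     description. Builds and returns a dictionary instance whose keys are unique
--     labels and whose values are lists of descriptions associated to the labels.
--
--     Parameters
--     ----------
--     lines: list
--         The list of lines containing labels and descriptions
--     """
--     # ---
--     def get_label(line: str) -> str:
--         label, *_ = line.split(":")
--         return label[2:].replace("-", "_")
--     # ---
--     def get_description(line: str) -> str:
--         _, *description = line.split(":")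
--         return ":".join(description)[1:]
--     # ---
--     def build_dict() -> dict:
--         dict_ = {}
--         for line in lines:
--             label = get_label(line)
--             description = get_description(line)
--             if label not in dict_:
--                 dict_[label] = {description}
--             else:
--                 dict_[label].add(description)
--         return dict_
--     # ---
--     return build_dict()
-- ===== SOURCE B (Python) =====
-- def build_labels_dict(lines: list) -> dict:
--     """
--     Receives a list of lines each containing a label and a corresponding
--     description. Returns a dict mapping each unique label to the set of its
--     descriptions. Works by repeated partitioning: parse every line into a
--     (label, description) pair, then, while pairs remain, take the first
--     pair's label, gather ALL descriptions carrying that label in one sweep,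
--     and drop that whole group from the worklist before continuing.
--     """
--     def parse(line: str):
--         head, *rest = line.split(":")
--         return head[2:].replace("-", "_"), ":".join(rest)[1:]
--     rest = [parse(line) for line in lines]
--     out = {}
--     while rest:
--         label = rest[0][0]
--         out[label] = set(d for l, d in rest if l == label)
--         rest = [p for p in rest if p[0] != label]
--     return out
-- ===== Notes on version B (the rewrite author's own statement) =====
-- stated objective: alternative
-- what changed: A makes one pass over the lines, branching per line on dict membership and mutating per-label sets incrementally; B parses all lines into pairs and then groups by repeated partitioning of a worklist: while pairs remain it takes the first pair's label, collects that label's whole description set in one filtering sweep, and removes the entire group from the worklist.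
import Mathlib
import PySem

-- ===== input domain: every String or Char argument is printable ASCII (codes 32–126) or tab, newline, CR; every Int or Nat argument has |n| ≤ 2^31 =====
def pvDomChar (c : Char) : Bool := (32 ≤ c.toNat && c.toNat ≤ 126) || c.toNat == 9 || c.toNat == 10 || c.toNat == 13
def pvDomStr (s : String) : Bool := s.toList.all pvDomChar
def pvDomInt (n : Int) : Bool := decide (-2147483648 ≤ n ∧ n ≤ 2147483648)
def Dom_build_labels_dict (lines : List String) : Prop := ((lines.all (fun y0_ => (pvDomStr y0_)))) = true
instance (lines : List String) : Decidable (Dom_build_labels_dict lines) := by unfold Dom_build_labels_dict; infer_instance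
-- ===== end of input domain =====

-- B replaces A's single-pass membership-branching dict build by group-extraction on a
-- worklist: parse all lines into pairs, then repeatedly take the first remaining pair's
-- label, collect that label's whole description set in one sweep, and drop the group;
-- alternative algorithm (O(n·k) for k distinct labels instead of A's single pass).

-- ===== PORT A =====
def pvGetLabel (line : String) : String :=
  let parts := (PySem.Str.split? line ":").getD []   -- sep ":" ≠ "", so split? is always some
  PySem.Str.replace (PySem.Str.slice (parts.headD "") (some 2) none) "-" "_"

def pvGetDescription (line : String) : String :=
  let parts := (PySem.Str.split? line ":").getD []   -- sep ":" ≠ "", so split? is always some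
  PySem.Str.slice (PySem.Str.join ":" parts.tail) (some 1) none

def build_labels_dict (lines : List String) : List (String × List String) :=
  (lines.foldl (fun d line =>
      let label := pvGetLabel line
      let description := pvGetDescription line
      if PySem.Dict.contains d label = false then
        PySem.Dict.insert d label (PySem.Set.ofList [description])
      else
        -- dict_[label].add(description): mutate the set stored at label in place
        PySem.Dict.modify d label PySem.Set.empty (fun s => PySem.Set.add s description))
    PySem.Dict.empty).items

-- ===== PORT B =====
def pvParse (line : String) : String × String :=
  let parts := (PySem.Str.split? line ":").getD []   -- sep ":" ≠ "", so split? is always some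
  (PySem.Str.replace (PySem.Str.slice (parts.headD "") (some 2) none) "-" "_",
   PySem.Str.slice (PySem.Str.join ":" parts.tail) (some 1) none)

-- the while loop: take the first pair's label, collect its whole group, drop it, repeat
def pvGroup : List (String × String) → PySem.Dict String (List String) → PySem.Dict String (List String)
  | [], out => out
  | (l, d) :: t, out =>
    pvGroup (((l, d) :: t).filter (fun p => p.1 != l))
      (PySem.Dict.insert out l
        (PySem.Set.ofList (((((l, d) :: t).filter (fun p => p.1 == l))).map Prod.snd)))
  termination_by rest _ => rest.length
  decreasing_by
    simp only [List.filter_cons, bne_self_eq_false, List.length_cons]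
    exact Nat.lt_succ_of_le (List.length_filter_le _ _)

def build_labels_dict_alt (lines : List String) : List (String × List String) :=
  (pvGroup (lines.map pvParse) PySem.Dict.empty).items

-- ===== PRECONDITION & SPEC =====
def Spec_build_labels_dict (lines : List String) (out : List (String × List String)) : Prop := out = build_labels_dict_alt lines
instance (lines : List String) (out : List (String × List String)) : Decidable (Spec_build_labels_dict lines out) := by unfold Spec_build_labels_dict; infer_instance

-- ===== CLAIM (what is proved, stated in full; the proofs are below) =====
def Claim_equal_build_labels_dict : Prop := ∀ (lines : List String), Dom_build_labels_dict lines → Spec_build_labels_dict lines (build_labels_dict lines)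

-- ===== LEMMAS AND PROOFS =====

-- the common grouping shape both sides are reduced to
def pvGroupSpec (pairs : List (String × String)) : List (String × List String) :=
  (PySem.Set.ofList (pairs.map Prod.fst)).map
    (fun c => (c, PySem.Set.ofList ((pairs.filter (fun p => p.1 == c)).map Prod.snd)))

-- dedup commutes with filter
theorem pv_ofList_filter {α : Type} [BEq α] [LawfulBEq α] (p : α → Bool) (xs : List α) :
    PySem.Set.ofList (xs.filter p) = (PySem.Set.ofList xs).filter p := by
  induction xs with
  | nil => rfl
  | cons x xs ih =>
    rw [List.filter_cons, PySem.Set.ofList_cons, PySem.Set.discard]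
    by_cases hx : p x = true
    · rw [if_pos hx, PySem.Set.ofList_cons, List.filter_cons_of_pos hx, ih,
        PySem.Set.discard, List.filter_filter, List.filter_filter]
      exact congrArg _ (List.filter_congr (fun a _ => Bool.and_comm _ _))
    · rw [if_neg hx, List.filter_cons_of_neg hx, ih, List.filter_filter]
      apply List.filter_congr
      intro a _
      by_cases ha : a = x
      · subst ha; simp [hx]
      · simp [ha]

-- A's if/else step is one modify: on a fresh key, modify's default [] makes exactly {description}
theorem pv_step_eq (d : PySem.Dict String (List String)) (line : String) :
    (if PySem.Dict.contains d (pvGetLabel line) = false then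
        PySem.Dict.insert d (pvGetLabel line) (PySem.Set.ofList [pvGetDescription line])
      else
        PySem.Dict.modify d (pvGetLabel line) PySem.Set.empty
          (fun s => PySem.Set.add s (pvGetDescription line)))
    = PySem.Dict.modify d (pvGetLabel line) PySem.Set.empty
        (fun s => PySem.Set.add s (pvGetDescription line)) := by
  by_cases h : PySem.Dict.contains d (pvGetLabel line) = false
  · simp only [h, if_true, PySem.Dict.modify,
      PySem.Dict.getD_of_not_contains d PySem.Set.empty h]
    rfl
  · simp [h]

-- value accumulated at key c by A's modify-and-add loop
theorem pv_getD_fold (l : List String)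
    (d : PySem.Dict String (List String)) (c : String) :
    (l.foldl (fun d x =>
        PySem.Dict.modify d (pvGetLabel x) PySem.Set.empty
          (fun s => PySem.Set.add s (pvGetDescription x))) d).getD c PySem.Set.empty
    = PySem.Set.update (d.getD c PySem.Set.empty)
        ((l.filter (fun x => pvGetLabel x == c)).map pvGetDescription) := by
  induction l generalizing d with
  | nil => rfl
  | cons x l ih =>
    simp only [List.foldl_cons, List.filter_cons]
    by_cases h : pvGetLabel x = c
    · subst h
      simp only [BEq.rfl, if_true, List.map_cons, PySem.Set.update_cons, ih,
        PySem.Dict.getD_modify_self]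
    · have hb : (pvGetLabel x == c) = false := by simp [h]
      rw [ih, PySem.Dict.getD_modify_of_ne d PySem.Set.empty _ (Ne.symm h)]
      simp [hb]

-- A's loop produces exactly the grouping shape
theorem pv_A_eq_groupSpec (lines : List String) :
    build_labels_dict lines = pvGroupSpec (lines.map pvParse) := by
  unfold build_labels_dict pvGroupSpec
  have hstep : (fun (d : PySem.Dict String (List String)) (line : String) =>
      let label := pvGetLabel line
      let description := pvGetDescription line
      if PySem.Dict.contains d label = false then
        PySem.Dict.insert d label (PySem.Set.ofList [description])
      else
        PySem.Dict.modify d label PySem.Set.empty (fun s => PySem.Set.add s description))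
    = (fun d line => PySem.Dict.modify d (pvGetLabel line) PySem.Set.empty
        (fun s => PySem.Set.add s (pvGetDescription line))) :=
    funext fun d => funext fun line => pv_step_eq d line
  rw [hstep]
  have hnd : (lines.foldl (fun d line =>
      PySem.Dict.modify d (pvGetLabel line) PySem.Set.empty
        (fun s => PySem.Set.add s (pvGetDescription line))) PySem.Dict.empty).keys.Nodup :=
    PySem.Dict.nodup_keys_foldl_modify_key lines pvGetLabel PySem.Set.empty
      (fun _ x => fun s => PySem.Set.add s (pvGetDescription x)) PySem.Dict.empty
      (by simp [PySem.Dict.keys_empty])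
  have hkeys : (lines.foldl (fun d line =>
      PySem.Dict.modify d (pvGetLabel line) PySem.Set.empty
        (fun s => PySem.Set.add s (pvGetDescription line))) PySem.Dict.empty).keys
      = PySem.Set.ofList ((lines.map pvParse).map Prod.fst) := by
    rw [PySem.Dict.keys_foldl_modify_key lines pvGetLabel PySem.Set.empty
      (fun _ x => fun s => PySem.Set.add s (pvGetDescription x)) PySem.Dict.empty,
      PySem.Dict.keys_empty, PySem.Set.update_nil_left, List.map_map]
    rfl
  rw [PySem.Dict.items_eq_map_keys _ hnd PySem.Set.empty, hkeys]
  apply List.map_congr_left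
  intro c _
  rw [pv_getD_fold lines PySem.Dict.empty c, PySem.Dict.getD_empty,
    PySem.Set.update_empty]
  have : ((lines.map pvParse).filter (fun p => p.1 == c)).map Prod.snd
      = (lines.filter (fun x => pvGetLabel x == c)).map pvGetDescription := by
    rw [List.filter_map, List.map_map]; rfl
  rw [this]

-- B's worklist loop appends exactly the grouping shape to the accumulator's items
theorem pv_group_items (pairs : List (String × String))
    (out : PySem.Dict String (List String))
    (hnd : out.keys.Nodup)
    (hdisj : ∀ c ∈ pairs.map Prod.fst, out.contains c = false) :
    (pvGroup pairs out).items = out.items ++ pvGroupSpec pairs := by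
  induction hn : pairs.length using Nat.strong_induction_on generalizing pairs out with
  | _ n ih0 =>
  match pairs, hn with
  | [], _ => simp [pvGroup, pvGroupSpec]
  | (l, d) :: t, hn =>
    have hlout : out.contains l = false := hdisj l (by simp)
    have hfresh : (PySem.Dict.insert out l
        (PySem.Set.ofList (((((l, d) :: t).filter (fun p => p.1 == l))).map Prod.snd))).items
        = out.items ++ [(l, PySem.Set.ofList (((((l, d) :: t).filter (fun p => p.1 == l))).map Prod.snd))] := by
      have := PySem.Dict.items_foldl_insert_fresh (l := [()])
        (k := fun _ => l)
        (v := fun _ => PySem.Set.ofList (((((l, d) :: t).filter (fun p => p.1 == l))).map Prod.snd))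
        (d := out) (by intro a _; exact hlout) (by simp)
      simpa using this
    -- the accumulator after inserting l's group: keys still unique, still fresh for the rest
    have hnd2 : (PySem.Dict.insert out l
        (PySem.Set.ofList (((((l, d) :: t).filter (fun p => p.1 == l))).map Prod.snd))).keys.Nodup := by
      rw [PySem.Dict.keys_insert_of_not_contains _ _ hlout]
      refine List.Nodup.append hnd (List.nodup_singleton l) ?_
      intro x hx hy
      simp only [List.mem_singleton] at hy
      subst hy
      exact absurd ((PySem.Dict.contains_iff_mem_keys _ _).mpr hx) (by simp [hlout])
    have hdisj2 : ∀ c ∈ (((l, d) :: t).filter (fun p => p.1 != l)).map Prod.fst,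
        (PySem.Dict.insert out l
          (PySem.Set.ofList (((((l, d) :: t).filter (fun p => p.1 == l))).map Prod.snd))).contains c = false := by
      intro c hc
      have hct : c ∈ (((l, d) :: t).map Prod.fst) := by
        rcases List.mem_map.mp hc with ⟨p, hp, hpc⟩
        exact List.mem_map.mpr ⟨p, List.mem_of_mem_filter hp, hpc⟩
      have hcl : c ≠ l := by
        rcases List.mem_map.mp hc with ⟨p, hp, hpc⟩
        have := List.of_mem_filter hp
        simpa [hpc] using this
      rw [PySem.Dict.contains_insert]
      simp [hcl, hdisj c hct]
    have ih : (pvGroup (((l, d) :: t).filter (fun p => p.1 != l))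
          (PySem.Dict.insert out l
            (PySem.Set.ofList (((((l, d) :: t).filter (fun p => p.1 == l))).map Prod.snd)))).items
        = (PySem.Dict.insert out l
            (PySem.Set.ofList (((((l, d) :: t).filter (fun p => p.1 == l))).map Prod.snd))).items
          ++ pvGroupSpec (((l, d) :: t).filter (fun p => p.1 != l)) := by
      refine ih0 _ ?_ _ _ hnd2 hdisj2 rfl
      subst hn
      simp only [List.filter_cons, bne_self_eq_false, List.length_cons]
      exact Nat.lt_succ_of_le (List.length_filter_le _ _)
    rw [pvGroup, ih, hfresh, List.append_assoc]
    congr 1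
    -- pvGroupSpec ((l,d)::t) = (l, l's group) :: pvGroupSpec (rest without label l)
    unfold pvGroupSpec
    have hmapfst : (((l, d) :: t).filter (fun p => p.1 != l)).map Prod.fst
        = ((t.map Prod.fst)).filter (fun y => y != l) := by
      have hhd : ((l, d) :: t).filter (fun p => p.1 != l) = t.filter (fun p => p.1 != l) := by
        simp
      rw [hhd, List.filter_map]
      rfl
    rw [List.map_cons, PySem.Set.ofList_cons, List.map_cons, hmapfst, pv_ofList_filter]
    simp only [PySem.Set.discard, List.singleton_append]
    have hpred : (List.filter (fun y => y != l) (PySem.Set.ofList (t.map Prod.fst)))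
        = (List.filter (fun y => !y == l) (PySem.Set.ofList (t.map Prod.fst))) := rfl
    rw [hpred]
    congr 1
    apply List.map_congr_left
    intro c hc
    have hcl : c ≠ l := by
      have := List.of_mem_filter hc
      simpa using this
    have : (((l, d) :: t).filter (fun p => p.1 != l)).filter (fun p => p.1 == c)
        = ((l, d) :: t).filter (fun p => p.1 == c) := by
      rw [List.filter_filter]
      apply List.filter_congr
      intro p _
      by_cases hp : p.1 = c
      · subst hp; simp [hcl]
      · simp [hp]
    rw [this]

-- ===== VERDICT (by name: the statement is the Claim_ definition above) =====
theorem build_labels_dict_spec : Claim_equal_build_labels_dict := by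
  intro lines _
  show build_labels_dict lines = build_labels_dict_alt lines
  rw [pv_A_eq_groupSpec, build_labels_dict_alt,
    pv_group_items (lines.map pvParse) PySem.Dict.empty
      (by simp [PySem.Dict.keys_empty])
      (by intro c _; exact PySem.Dict.contains_empty c)]
  rfl
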